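-- pv_equiv track=rewrite | github.com/teekuningas/icasso | icasso/_icasso.py | _get_components_by_clusters
-- ===== SOURCE A (Python) =====
-- def _get_components_by_clusters(clusters_by_components):
--     """ Converts clusters-by-components representation to
--     components-by-clusters """
--     components_by_clusters = {}
--     for comp_idx, cluster_id in enumerate(clusters_by_components):
--         if cluster_id not in components_by_clusters:
--             components_by_clusters[cluster_id] = []
--         components_by_clusters[cluster_id].append(comp_idx)
--     components_by_clusters = sorted(components_by_clusters.items(),
--                                     key=lambda x: x[0])
--     components_by_clusters = [val for key, val in components_by_clusters]
--     return components_by_clusters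
-- ===== SOURCE B (Python) =====
-- def _get_components_by_clusters(clusters_by_components):
--     """Converts clusters-by-components representation to
--     components-by-clusters"""
--     pairs = sorted(enumerate(clusters_by_components), key=lambda p: p[1])
--     out = []
--     prev = None
--     for i, c in pairs:
--         if out and prev == c:
--             out[-1].append(i)
--         else:
--             out.append([i])
--         prev = c
--     return out
-- ===== Notes on version B (the rewrite author's own statement) =====
-- stated objective: alternative
-- what changed: Replaces the dict-of-lists grouping pass followed by sorting the dict items with a stable sort of the enumerated (index, cluster_id) pairs by cluster id followed by a single pass that groups consecutive equal-id runs; no dictionary is used.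
import Mathlib
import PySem

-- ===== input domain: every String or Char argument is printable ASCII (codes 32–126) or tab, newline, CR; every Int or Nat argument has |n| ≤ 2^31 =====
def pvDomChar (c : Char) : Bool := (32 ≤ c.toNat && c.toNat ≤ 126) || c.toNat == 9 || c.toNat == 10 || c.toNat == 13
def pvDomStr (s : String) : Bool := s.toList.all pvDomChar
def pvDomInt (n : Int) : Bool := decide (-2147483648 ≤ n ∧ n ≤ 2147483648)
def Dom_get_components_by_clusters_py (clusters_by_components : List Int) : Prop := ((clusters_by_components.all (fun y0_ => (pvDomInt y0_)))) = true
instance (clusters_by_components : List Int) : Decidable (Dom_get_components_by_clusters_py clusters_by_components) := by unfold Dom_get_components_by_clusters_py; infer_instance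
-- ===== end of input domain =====

-- B replaces A's dict-of-lists grouping followed by sorting the dict items with a stable sort of the
-- enumerated pairs by cluster id followed by grouping consecutive runs (alternative; no speed claim).

-- ===== PORT A =====
def get_components_by_clusters_py (clusters_by_components : List Int) : List (List Int) :=
  -- components_by_clusters = {}; for comp_idx, cluster_id in enumerate(...): if absent insert []; append comp_idx
  let d : PySem.Dict Int (List Int) :=
    (PySem.List.enumerate clusters_by_components 0).foldl
      (fun d p =>
        let d' := if d.contains p.2 then d else d.insert p.2 ([] : List Int)
        d'.modify p.2 [] (fun l => l ++ [p.1]))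
      PySem.Dict.empty
  -- sorted(d.items(), key=lambda x: x[0]); then [val for key, val in ...]
  (PySem.List.sorted d.items (fun x => x.1)).map (fun x => x.2)

-- ===== PORT B =====
def get_components_by_clusters_py_alt (clusters_by_components : List Int) : List (List Int) :=
  -- pairs = sorted(enumerate(clusters_by_components), key=lambda p: p[1])
  let pairs := PySem.List.sorted (PySem.List.enumerate clusters_by_components 0) (fun p => p.2)
  -- out = []; prev = None; for i, c in pairs: append to out[-1] or start a new group
  let res := pairs.foldl
    (fun (st : List (List Int) × Option Int) p =>
      if st.1 ≠ [] ∧ st.2 = some p.2 then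
        (st.1.dropLast ++ [st.1.getLastD [] ++ [p.1]], some p.2)
      else
        (st.1 ++ [[p.1]], some p.2))
    ([], none)
  res.1

-- ===== PRECONDITION & SPEC =====
def Spec_get_components_by_clusters_py (clusters_by_components : List Int) (out : List (List Int)) : Prop := out = get_components_by_clusters_py_alt clusters_by_components
instance (clusters_by_components : List Int) (out : List (List Int)) : Decidable (Spec_get_components_by_clusters_py clusters_by_components out) := by unfold Spec_get_components_by_clusters_py; infer_instance

-- ===== CLAIM (what is proved, stated in full; the proofs are below) =====
def Claim_equal_get_components_by_clusters_py : Prop := ∀ (clusters_by_components : List Int), Dom_get_components_by_clusters_py clusters_by_components → Spec_get_components_by_clusters_py clusters_by_components (get_components_by_clusters_py clusters_by_components)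

-- ===== LEMMAS AND PROOFS =====

-- Abbreviation used only by the proofs: the block of pairs of l whose cluster id is k.
def blk (l : List (Int × Int)) (k : Int) : List (Int × Int) :=
  l.filter (fun p => p.2 == k)

-- A's loop body: the "if absent, insert []" guard before the append is absorbed by modify.
theorem step_eq (d : PySem.Dict Int (List Int)) (k i : Int) :
    (if d.contains k then d else d.insert k ([] : List Int)).modify k [] (fun l => l ++ [i])
      = d.modify k [] (fun l => l ++ [i]) := by
  by_cases h : d.contains k
  · simp [h]
  · have h0 : d.get? k = none := (PySem.Dict.get?_eq_none_iff_contains d k).mpr (by simpa using h)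
    have hg : d.getD k ([] : List Int) = [] := by simp [PySem.Dict.getD, h0]
    simp only [h]
    simp [PySem.Dict.modify, PySem.Dict.getD_insert_self, PySem.Dict.insert_insert_self, hg]

-- A's dict after the loop, as a fold of plain modifies.
theorem dictA_eq (xs : List Int) :
    ((PySem.List.enumerate xs 0).foldl
      (fun d p =>
        let d' := if d.contains p.2 then d else d.insert p.2 ([] : List Int)
        d'.modify p.2 [] (fun l => l ++ [p.1]))
      PySem.Dict.empty)
    = (PySem.List.enumerate xs 0).foldl
        (fun d p => d.modify p.2 [] (fun l => l ++ [p.1])) PySem.Dict.empty := by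
  have : (fun (d : PySem.Dict Int (List Int)) (p : Int × Int) =>
        let d' := if d.contains p.2 then d else d.insert p.2 ([] : List Int)
        d'.modify p.2 [] (fun l => l ++ [p.1]))
      = fun d p => d.modify p.2 [] (fun l => l ++ [p.1]) := by
    funext d p; exact step_eq d p.2 p.1
  rw [this]

-- A's result in canonical form: sorted distinct cluster ids, each mapped to its block of indices.
theorem a_canonical (xs : List Int) :
    get_components_by_clusters_py xs
      = (PySem.List.sorted (PySem.Set.ofList xs) (fun k => k)).map
          (fun k => (blk (PySem.List.enumerate xs 0) k).map (fun p => p.1)) := by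
  unfold get_components_by_clusters_py
  simp only []
  rw [dictA_eq]
  set F : Int → List Int := fun k => (blk (PySem.List.enumerate xs 0) k).map (fun p => p.1) with hF
  set D : PySem.Dict Int (List Int) :=
    (PySem.List.enumerate xs 0).foldl
      (fun d p => d.modify p.2 [] (fun l => l ++ [p.1])) PySem.Dict.empty with hD
  have hkeys : D.keys = PySem.Set.ofList xs := by
    rw [hD, PySem.Dict.keys_foldl_modify_key (PySem.List.enumerate xs 0) (fun p => p.2)
          ([] : List Int) (fun d p => fun l => l ++ [p.1]) PySem.Dict.empty]
    rw [PySem.List.map_snd_enumerate]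
    rfl
  have hnd : D.keys.Nodup := by
    rw [hD]
    exact PySem.Dict.nodup_keys_foldl_modify_key _ _ _ _ _ (by simp [PySem.Dict.keys_empty])
  have hget : ∀ k : Int, D.getD k [] = F k := by
    intro k
    have hswap : D = ((PySem.List.enumerate xs 0).map (fun p => (p.2, p.1))).foldl
        (fun d p => d.modify p.1 [] (fun l => l ++ [p.2])) PySem.Dict.empty := by
      rw [hD, List.foldl_map]
    rw [hswap, PySem.Dict.getD_foldl_modify_append]
    simp [hF, blk, List.filter_map, List.map_map, Function.comp_def]
  have hitems : D.items = (PySem.Set.ofList xs).map (fun k => (k, F k)) := by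
    rw [PySem.Dict.items_eq_map_keys D hnd ([] : List Int), hkeys]
    exact List.map_congr_left (fun k _ => by rw [hget k])
  have hsorted : PySem.List.sorted D.items (fun x => x.1)
      = (PySem.List.sorted (PySem.Set.ofList xs) (fun k => k)).map (fun k => (k, F k)) := by
    apply PySem.List.sorted_eq_of_perm_of_pairwise_lt
    · rw [hitems]
      exact (PySem.List.sorted_perm _ _ false).map _
    · exact (PySem.List.sorted_ofList_pairwise_lt xs).map _ (fun a b h => h)
  rw [hsorted, List.map_map]
  rfl

-- insertBy passes over a prefix it does not insert into.
theorem insertBy_pass {α : Type} (before : α → α → Bool) (x : α) (b r : List α)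
    (h : ∀ y ∈ b, before x y = false) :
    PySem.List.insertBy before x (b ++ r) = b ++ PySem.List.insertBy before x r := by
  induction b with
  | nil => rfl
  | cons y b ih =>
    have hy : before x y = false := h y (by simp)
    simp [PySem.List.insertBy, hy, ih (fun z hz => h z (by simp [hz]))]

-- insertBy puts x in front when it goes before everything.
theorem insertBy_front {α : Type} (before : α → α → Bool) (x : α) (r : List α)
    (h : ∀ y ∈ r, before x y = true) :
    PySem.List.insertBy before x r = x :: r := by
  cases r with
  | nil => rfl
  | cons y r => simp [PySem.List.insertBy, h y (by simp)]

theorem mem_blk_snd {l : List (Int × Int)} {k : Int} {p : Int × Int} (h : p ∈ blk l k) :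
    p.2 = k := by
  have := List.of_mem_filter h
  simpa using this

theorem blk_append_singleton (l : List (Int × Int)) (x : Int × Int) (k : Int) :
    blk (l ++ [x]) k = blk l k ++ if x.2 == k then [x] else [] := by
  by_cases h : x.2 = k <;> simp [blk, List.filter_append, h]

-- STABLE SORT DECOMPOSITION: sorting pairs by their cluster id is the concatenation, over the
-- sorted distinct ids, of the original blocks (stability keeps each block's internal order).
-- every pair in a flatMap of blocks carries a cluster id from the key list
theorem snd_mem_of_mem_flatMap {ks : List Int} {l : List (Int × Int)} {y : Int × Int}
    (h : y ∈ ks.flatMap (blk l)) : y.2 ∈ ks := by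
  rcases List.mem_flatMap.mp h with ⟨k, hk, hy⟩
  rw [mem_blk_snd hy]
  exact hk

-- STABLE SORT DECOMPOSITION: sorting pairs by their cluster id is the concatenation, over the
-- sorted distinct ids, of the original blocks (stability keeps each block's internal order).
theorem sorted_snd_eq_flatMap (l : List (Int × Int)) :
    PySem.List.sorted l (fun p => p.2)
      = (PySem.List.sorted (PySem.Set.ofList (l.map (fun p => p.2))) (fun k => k)).flatMap
          (blk l) := by
  induction l using List.reverseRecOn with
  | nil => rfl
  | append_singleton l x ih =>
    have hL : PySem.List.sorted (l ++ [x]) (fun p => p.2)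
        = PySem.List.insertBy (fun a b => decide (a.2 < b.2)) x
            (PySem.List.sorted l (fun p => p.2)) := by
      rw [PySem.List.sorted_eq_foldl_insertBy, List.foldl_append, List.foldl_cons,
        List.foldl_nil, ← PySem.List.sorted_eq_foldl_insertBy]
    set k0 := x.2 with hk0
    set ks := PySem.List.sorted (PySem.Set.ofList (l.map (fun p => p.2))) (fun k => k) with hks
    have hpw : ks.Pairwise (· < ·) := PySem.List.sorted_ofList_pairwise_lt _
    have hmem : ∀ k, k ∈ ks ↔ k ∈ l.map (fun p => p.2) := by
      intro k
      rw [hks, PySem.List.mem_sorted, PySem.Set.mem_ofList]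
    set ks1 := ks.takeWhile (fun k => decide (k < k0)) with hks1
    set ks2 := ks.dropWhile (fun k => decide (k < k0)) with hks2
    have hsplit : ks = ks1 ++ ks2 := (List.takeWhile_append_dropWhile).symm
    have h1lt : ∀ k ∈ ks1, k < k0 := fun k hk => by
      simpa using List.mem_takeWhile_imp hk
    have hpw12 := List.pairwise_append.mp (hsplit ▸ hpw)
    have h2ge : ∀ k ∈ ks2, k0 ≤ k := by
      cases h2 : ks2 with
      | nil => intro k hk; simp at hk
      | cons h t =>
        have hh : ¬ h < k0 := by
          have := List.head?_dropWhile_not (fun k => decide (k < k0)) ks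
          rw [← hks2, h2] at this
          simpa using this
        intro k hk
        rcases List.mem_cons.mp hk with rfl | hkt
        · omega
        · have : h < k := (List.pairwise_cons.mp (h2 ▸ hpw12.2.1)).1 k hkt
          omega
    -- the two insert steps, generic in the tail keys
    have hins : ∀ r : List (Int × Int), (∀ y ∈ r, k0 < y.2) →
        PySem.List.insertBy (fun a b => decide (a.2 < b.2)) x
          ((ks1.flatMap (blk l) ++ blk l k0) ++ r)
        = (ks1.flatMap (blk l) ++ blk l k0) ++ (x :: r) := by
      intro r hr
      rw [insertBy_pass _ _ (ks1.flatMap (blk l) ++ blk l k0) r ?_]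
      · rw [insertBy_front _ _ r (fun y hy => by simp; exact hr y hy)]
      · intro y hy
        rcases List.mem_append.mp hy with hy1 | hy0
        · have := h1lt _ (snd_mem_of_mem_flatMap hy1)
          simp; omega
        · have := mem_blk_snd hy0
          simp [this, hk0]
    by_cases hK : k0 ∈ ks
    · -- the id of x already occurs in l: the key list is unchanged, x joins its block
      have hk0n1 : k0 ∉ ks1 := fun h => by have := h1lt k0 h; omega
      have hk0in2 : k0 ∈ ks2 := by
        rw [hsplit] at hK
        rcases List.mem_append.mp hK with h | h
        · exact absurd h hk0n1
        · exact h
      obtain ⟨h, t, h2⟩ : ∃ h t, ks2 = h :: t := by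
        cases h2 : ks2 with
        | nil => rw [h2] at hk0in2; simp at hk0in2
        | cons h t => exact ⟨h, t, rfl⟩
      have hp2 := hpw12.2.1
      rw [h2] at hp2
      have hhk0 : h = k0 := by
        have hge : k0 ≤ h := h2ge h (by rw [h2]; simp)
        rw [h2] at hk0in2
        rcases List.mem_cons.mp hk0in2 with rfl | hkt
        · rfl
        · have : h < k0 := (List.pairwise_cons.mp hp2).1 k0 hkt
          omega
      rw [hhk0] at h2 hp2
      have htgt : ∀ k ∈ t, k0 < k := (List.pairwise_cons.mp hp2).1
      have hkeys' : PySem.Set.ofList ((l ++ [x]).map (fun p => p.2))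
          = PySem.Set.ofList (l.map (fun p => p.2)) := by
        rw [List.map_append, List.map_singleton, PySem.Set.ofList_append_singleton]
        exact PySem.Set.add_of_mem (by rw [PySem.Set.mem_ofList]; exact (hmem _).mp hK)
      have hb1 : ks1.flatMap (blk (l ++ [x])) = ks1.flatMap (blk l) := by
        apply List.flatMap_congr
        intro k hk
        rw [blk_append_singleton]
        have : ¬ (x.2 = k) := by have := h1lt k hk; omega
        simp [this]
      have hbt : t.flatMap (blk (l ++ [x])) = t.flatMap (blk l) := by
        apply List.flatMap_congr
        intro k hk
        rw [blk_append_singleton]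
        have : ¬ (x.2 = k) := by have := htgt k hk; omega
        simp [this]
      have hb0 : blk (l ++ [x]) k0 = blk l k0 ++ [x] := by
        rw [blk_append_singleton, hk0]; simp
      rw [hL, ih, hkeys', ← hks, hsplit, h2]
      rw [List.flatMap_append, List.flatMap_cons, List.flatMap_append, List.flatMap_cons]
      rw [hb1, hbt, hb0]
      rw [show ks1.flatMap (blk l) ++ (blk l k0 ++ t.flatMap (blk l))
            = (ks1.flatMap (blk l) ++ blk l k0) ++ t.flatMap (blk l) by simp]
      rw [hins (t.flatMap (blk l)) (fun y hy => htgt _ (snd_mem_of_mem_flatMap hy))]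
      simp
    · -- a fresh id: it is inserted between the smaller and the larger ids, with block [x]
      have h2gt : ∀ k ∈ ks2, k0 < k := by
        intro k hk
        have hge := h2ge k hk
        have : k ≠ k0 := by
          intro e
          subst e
          exact hK (by rw [hsplit]; exact List.mem_append.mpr (Or.inr hk))
        omega
      have hk0nl : k0 ∉ l.map (fun p => p.2) := fun hmm => hK ((hmem k0).mpr hmm)
      have hblk0 : blk l k0 = [] := by
        rw [blk, List.filter_eq_nil_iff]
        intro p hp hc
        exact hk0nl (List.mem_map.mpr ⟨p, hp, by simpa using hc⟩)
      have hkeys' : PySem.Set.ofList ((l ++ [x]).map (fun p => p.2))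
          = PySem.Set.ofList (l.map (fun p => p.2)) ++ [k0] := by
        rw [List.map_append, List.map_singleton, PySem.Set.ofList_append_singleton]
        exact PySem.Set.add_of_not_mem (by rw [PySem.Set.mem_ofList]; exact hk0nl)
      have hks' : PySem.List.sorted (PySem.Set.ofList ((l ++ [x]).map (fun p => p.2)))
          (fun k => k) = ks1 ++ k0 :: ks2 := by
        rw [hkeys']
        apply PySem.List.sorted_eq_of_perm_of_pairwise_lt
        · have p1 : (ks1 ++ k0 :: ks2).Perm (k0 :: (ks1 ++ ks2)) := List.perm_middle
          have p2 : (ks1 ++ ks2).Perm (PySem.Set.ofList (l.map (fun p => p.2))) := by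
            rw [← hsplit]
            exact hks ▸ PySem.List.sorted_perm _ _ false
          have p4 := List.perm_append_singleton k0 (PySem.Set.ofList (l.map (fun p => p.2)))
          exact p1.trans ((p2.cons k0).trans p4.symm)
        · rw [List.pairwise_append]
          refine ⟨hpw12.1, List.pairwise_cons.mpr ⟨h2gt, hpw12.2.1⟩, ?_⟩
          intro a ha b hb
          rcases List.mem_cons.mp hb with rfl | hb2
          · exact h1lt a ha
          · exact hpw12.2.2 a ha b hb2
      have hb1 : ks1.flatMap (blk (l ++ [x])) = ks1.flatMap (blk l) := by
        apply List.flatMap_congr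
        intro k hk
        rw [blk_append_singleton]
        have : ¬ (x.2 = k) := by have := h1lt k hk; omega
        simp [this]
      have hb2 : ks2.flatMap (blk (l ++ [x])) = ks2.flatMap (blk l) := by
        apply List.flatMap_congr
        intro k hk
        rw [blk_append_singleton]
        have : ¬ (x.2 = k) := by have := h2gt k hk; omega
        simp [this]
      have hb0 : blk (l ++ [x]) k0 = [x] := by
        rw [blk_append_singleton, hblk0]; simp [hk0]
      rw [hL, ih, hks', hsplit]
      rw [List.flatMap_append, List.flatMap_append, List.flatMap_cons]
      rw [hb1, hb2, hb0]
      rw [show ks1.flatMap (blk l) ++ ks2.flatMap (blk l)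
            = (ks1.flatMap (blk l) ++ blk l k0) ++ ks2.flatMap (blk l) by simp [hblk0]]
      rw [hins (ks2.flatMap (blk l)) (fun y hy => h2gt _ (snd_mem_of_mem_flatMap hy))]
      simp [hblk0]

theorem fold_group_run (l : List (Int × Int)) (k : Int) (hk : ∀ p ∈ l, p.2 = k)
    (out : List (List Int)) (g : List Int) :
    l.foldl
      (fun (st : List (List Int) × Option Int) p =>
        if st.1 ≠ [] ∧ st.2 = some p.2 then
          (st.1.dropLast ++ [st.1.getLastD [] ++ [p.1]], some p.2)
        else
          (st.1 ++ [[p.1]], some p.2))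
      (out ++ [g], some k)
    = (out ++ [g ++ l.map (fun p => p.1)], some k) := by
  induction l generalizing g with
  | nil => simp
  | cons p l ih =>
    have hp : p.2 = k := hk p (by simp)
    simp only [List.foldl_cons]
    rw [if_pos (by simp [hp])]
    simp only [List.dropLast_concat, List.getLastD_concat, hp]
    rw [ih (fun q hq => hk q (by simp [hq])) (g ++ [p.1])]
    simp

-- A whole nonempty block starts a new group and fills it.
theorem fold_group_block (l : List (Int × Int)) (k : Int) (hk : ∀ p ∈ l, p.2 = k)
    (hne : l ≠ []) (out : List (List Int)) (pr : Option Int) (hpr : pr ≠ some k) :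
    l.foldl
      (fun (st : List (List Int) × Option Int) p =>
        if st.1 ≠ [] ∧ st.2 = some p.2 then
          (st.1.dropLast ++ [st.1.getLastD [] ++ [p.1]], some p.2)
        else
          (st.1 ++ [[p.1]], some p.2))
      (out, pr)
    = (out ++ [l.map (fun p => p.1)], some k) := by
  cases l with
  | nil => exact absurd rfl hne
  | cons p l =>
    have hp : p.2 = k := hk p (by simp)
    simp only [List.foldl_cons]
    rw [if_neg (by simp [hp]; intro _; exact fun h => hpr (by rw [h]))]
    have := fold_group_run l k (fun q hq => hk q (by simp [hq])) out [p.1]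
    rw [hp, this]
    simp

-- Folding the grouping step over strictly-increasing-key blocks emits one group per block.
theorem fold_group_blocks (ks : List Int) (f : Int → List (Int × Int))
    (hpw : ks.Pairwise (· < ·)) (hkey : ∀ k ∈ ks, ∀ p ∈ f k, p.2 = k)
    (hne : ∀ k ∈ ks, f k ≠ []) (out : List (List Int)) (pr : Option Int)
    (hpr : ∀ k, ks.head? = some k → pr ≠ some k) :
    (ks.flatMap f).foldl
      (fun (st : List (List Int) × Option Int) p =>
        if st.1 ≠ [] ∧ st.2 = some p.2 then
          (st.1.dropLast ++ [st.1.getLastD [] ++ [p.1]], some p.2)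
        else
          (st.1 ++ [[p.1]], some p.2))
      (out, pr)
    = (out ++ ks.map (fun k => (f k).map (fun p => p.1)),
       ks.foldl (fun a k => some k) pr) := by
  induction ks generalizing out pr with
  | nil => simp
  | cons k ks ih =>
    simp only [List.flatMap_cons, List.foldl_append]
    rw [fold_group_block (f k) k (hkey k (by simp)) (hne k (by simp)) out pr
          (hpr k (by simp))]
    rw [ih (List.Pairwise.sublist (by simp) hpw)
          (fun k' hk' => hkey k' (by simp [hk'])) (fun k' hk' => hne k' (by simp [hk']))
          (out ++ [(f k).map (fun p => p.1)]) (some k) ?_]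
    · simp
    · intro k' hk' hcon
      have : k < k' := (List.pairwise_cons.mp hpw).1 k' (List.mem_of_mem_head? hk')
      simp at hcon
      omega

theorem main_eq (xs : List Int) :
    get_components_by_clusters_py xs = get_components_by_clusters_py_alt xs := by
  rw [a_canonical]
  unfold get_components_by_clusters_py_alt
  simp only []
  set l := PySem.List.enumerate xs 0 with hl
  have hl2 : l.map (fun p => p.2) = xs := PySem.List.map_snd_enumerate xs 0
  set ks := PySem.List.sorted (PySem.Set.ofList xs) (fun k => k) with hksdef
  have hsort : PySem.List.sorted l (fun p => p.2) = ks.flatMap (blk l) := by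
    rw [sorted_snd_eq_flatMap, hl2]
  rw [hsort]
  have hpw : ks.Pairwise (· < ·) := by
    rw [hksdef, ← hl2]
    exact PySem.List.sorted_ofList_pairwise_lt _
  have hmem : ∀ k ∈ ks, k ∈ l.map (fun p => p.2) := by
    intro k hk
    rw [hl2]
    rw [hksdef, PySem.List.mem_sorted, PySem.Set.mem_ofList] at hk
    exact hk
  rw [fold_group_blocks ks (blk l) hpw (fun k _ p hp => mem_blk_snd hp) ?_ [] none
        (fun k _ => by simp)]
  · simp
  · intro k hk
    rcases List.mem_map.mp (hmem k hk) with ⟨p, hp, he⟩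
    intro hnil
    rw [blk, List.filter_eq_nil_iff] at hnil
    exact hnil p hp (by simp [he])

-- ===== VERDICT (by name: the statement is the Claim_ definition above) =====
theorem get_components_by_clusters_py_spec : Claim_equal_get_components_by_clusters_py := by
  intro xs _
  exact main_eq xs
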